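-- pv_equiv track=rewrite | github.com/nhhgia25174600087DHKL19A4/K19A4_TH_THCS | 8.1_24174600101_Dao Yen Ly/bai_4.py | tinh_P
-- ===== SOURCE A (Python) =====
-- def tinh_P(x, y, n):
--     # tinh x^y
--     luy_thua = 1
--     i = 0
--     while i < y:
--         luy_thua = luy_thua * x
--         i = i + 1
--
--     tong = 0
--     k = 1
--
--     while k <= n:
--         # tinh y^k
--         mu = 1
--         j = 0
--         while j < k:
--             mu = mu * y
--             j = j + 1
--
--         tong = tong + (x + 32*y + mu)
--         k = k + 1
--
--     return luy_thua + tong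
-- ===== SOURCE B (Python) =====
-- def tinh_P(x, y, n):
--     # x^y (A's loop yields 1 for y <= 0), plus n*(x+32y) + sum of y^k via a running product
--     p = x ** y if y > 0 else 1
--     m = n if n > 0 else 0
--     total = m * (x + 32 * y)
--     acc = 1
--     for _ in range(m):
--         acc *= y
--         total += acc
--     return p + total
-- ===== Notes on version B (the rewrite author's own statement) =====
-- stated objective: faster
-- what changed: Replaces the power-recomputing nested loops with built-in exponentiation for x^y, a closed form for the n*(x+32y) linear part, and a single running product for the y^k terms.
import Mathlib
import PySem

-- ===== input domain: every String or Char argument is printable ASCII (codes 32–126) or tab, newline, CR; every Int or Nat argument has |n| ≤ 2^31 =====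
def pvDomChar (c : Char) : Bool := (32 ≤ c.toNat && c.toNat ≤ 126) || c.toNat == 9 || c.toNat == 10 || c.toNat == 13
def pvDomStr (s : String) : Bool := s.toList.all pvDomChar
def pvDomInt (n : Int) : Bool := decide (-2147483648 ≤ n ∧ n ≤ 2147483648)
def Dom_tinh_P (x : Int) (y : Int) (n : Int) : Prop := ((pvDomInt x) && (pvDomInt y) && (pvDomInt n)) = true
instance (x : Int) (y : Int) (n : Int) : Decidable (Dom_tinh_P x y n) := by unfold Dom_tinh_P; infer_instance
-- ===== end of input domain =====

-- B replaces A's power-recomputing nested loops with x^y, a closed form for the linear part,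
-- and one running product for the y^k terms (faster: O(y+n^2) → O(y+n) multiplications).


-- ===== PORT A =====
-- while i < y runs y.toNat times; while k <= n iterates k = 1..n (n.toNat values);
-- the inner while j < k runs k times, rebuilding mu = y^k from 1 each iteration.
def tinh_P (x : Int) (y : Int) (n : Int) : Int :=
  let luy_thua := List.foldl (fun acc _ => acc * x) 1 (List.range y.toNat)
  let tong := List.foldl
    (fun acc k =>
      let mu := List.foldl (fun m _ => m * y) 1 (List.range k)
      acc + (x + 32 * y + mu))
    0 ((List.range n.toNat).map (· + 1))
  luy_thua + tong

-- ===== PORT B =====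
-- x ** y for y > 0 else 1; m*(x+32y) closed form; single running product acc for y^k.
def tinh_P_alt (x : Int) (y : Int) (n : Int) : Int :=
  let p := if y > 0 then x ^ y.toNat else 1
  let m := if n > 0 then n.toNat else 0
  let st := List.foldl (fun (s : Int × Int) _ =>
      let acc := s.2 * y
      (s.1 + acc, acc)) ((m : Int) * (x + 32 * y), 1) (List.range m)
  p + st.1

-- ===== PRECONDITION & SPEC =====
def Spec_tinh_P (x : Int) (y : Int) (n : Int) (out : Int) : Prop := out = tinh_P_alt x y n
instance (x : Int) (y : Int) (n : Int) (out : Int) : Decidable (Spec_tinh_P x y n out) := by unfold Spec_tinh_P; infer_instance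

-- ===== CLAIM (what is proved, stated in full; the proofs are below) =====
def Claim_equal_tinh_P : Prop := ∀ (x : Int) (y : Int) (n : Int), Dom_tinh_P x y n → Spec_tinh_P x y n (tinh_P x y n)

-- ===== LEMMAS AND PROOFS =====

-- A's repeated-multiplication loop computes a power.
theorem pv_powFold (x c : Int) (m : Nat) :
    List.foldl (fun acc _ => acc * x) c (List.range m) = c * x ^ m := by
  induction m generalizing c with
  | zero => simp
  | succ m ih => simp [List.range_succ, ih, pow_succ]; ring

-- B's fold: running sum and running product, from a general start state.
theorem pv_bFold (y t a : Int) (m : Nat) :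
    List.foldl (fun (s : Int × Int) _ => (s.1 + s.2 * y, s.2 * y)) (t, a) (List.range m)
      = (t + a * ((List.range m).map (fun k => y ^ (k + 1))).sum, a * y ^ m) := by
  induction m generalizing t a with
  | zero => simp
  | succ m ih =>
    simp [List.range_succ, ih, pow_succ]
    constructor
    · ring
    · ring

-- A's outer loop is the sum of the per-k terms.
theorem pv_aFold (x y : Int) (m : Nat) :
    List.foldl
      (fun acc k =>
        let mu := List.foldl (fun mu2 _ => mu2 * y) 1 (List.range k)
        acc + (x + 32 * y + mu))
      0 ((List.range m).map (· + 1))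
      = (m : Int) * (x + 32 * y) + ((List.range m).map (fun k => y ^ (k + 1))).sum := by
  induction m with
  | zero => simp
  | succ m ih =>
    simp only [List.range_succ, List.map_append, List.foldl_append] at *
    rw [ih]
    simp only [List.map_cons, List.map_nil, List.foldl_cons, List.foldl_nil,
      List.sum_append, List.sum_cons, List.sum_nil]
    rw [pv_powFold y 1 (m + 1)]
    push_cast
    ring

-- ===== VERDICT (by name: the statement is the Claim_ definition above) =====
theorem tinh_P_spec : Claim_equal_tinh_P := by
  intro x y n _
  show tinh_P x y n = tinh_P_alt x y n
  simp only [tinh_P, tinh_P_alt]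
  rw [pv_aFold, pv_bFold, pv_powFold]
  have hm : (if n > 0 then n.toNat else 0) = n.toNat := by
    split_ifs with h
    · rfl
    · omega
  have hp : (if y > 0 then x ^ y.toNat else 1) = x ^ y.toNat := by
    split_ifs with h
    · rfl
    · have : y.toNat = 0 := by omega
      simp [this]
  rw [hm, hp]
  ring
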